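-- pv_equiv track=rewrite | github.com/Hunterdii/GeeksforGeeks-POTD | October 2024 GFG SOLUTION/October-24.py | modifyAndRearrangeArr
-- ===== SOURCE A (Python) =====
-- def modifyAndRearrangeArr(arr):
--     n = len(arr)
--
--     for i in range(n - 1):
--         if arr[i] != 0 and arr[i] == arr[i + 1]:
--             arr[i] = 2 * arr[i]
--             arr[i + 1] = 0
--
--     nonZeroIndex = 0
--     for i in range(n):
--         if arr[i] != 0:
--             arr[nonZeroIndex] = arr[i]
--             nonZeroIndex += 1
--
--     while nonZeroIndex < n:
--         arr[nonZeroIndex] = 0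
--         nonZeroIndex += 1
--
--     return arr
-- ===== SOURCE B (Python) =====
-- def modifyAndRearrangeArr(arr):
--     n = len(arr)
--     res = []
--     i = 0
--     while i < n:
--         a = arr[i]
--         if a != 0 and i + 1 < n and arr[i + 1] == a:
--             res.append(2 * a)
--             i += 2
--         else:
--             if a != 0:
--                 res.append(a)
--             i += 1
--     res.extend([0] * (n - len(res)))
--     arr[:] = res
--     return arr
-- ===== Notes on version B (the rewrite author's own statement) =====
-- stated objective: alternative
-- what changed: Fuses A's three passes (in-place pairwise merge, two-pointer compaction, zero-fill) into one forward pass that builds the compacted result directly, advancing by 2 over merged pairs, then pads with zeros and assigns arr[:].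
import Mathlib
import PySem

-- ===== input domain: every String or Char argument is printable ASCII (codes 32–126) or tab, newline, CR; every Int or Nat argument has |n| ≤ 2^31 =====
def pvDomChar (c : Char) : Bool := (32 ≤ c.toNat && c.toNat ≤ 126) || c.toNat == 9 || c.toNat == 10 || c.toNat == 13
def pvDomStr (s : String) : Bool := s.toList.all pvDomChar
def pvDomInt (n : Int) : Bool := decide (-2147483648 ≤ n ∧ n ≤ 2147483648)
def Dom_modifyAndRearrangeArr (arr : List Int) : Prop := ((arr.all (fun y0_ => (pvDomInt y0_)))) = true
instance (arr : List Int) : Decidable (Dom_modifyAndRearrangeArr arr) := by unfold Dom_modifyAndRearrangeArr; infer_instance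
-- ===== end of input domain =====

-- B fuses A's three passes (in-place pairwise merge, two-pointer compaction, zero-fill) into one
-- forward pass that builds the compacted result directly, then pads with zeros; both Pythons mutate
-- arr in place to the same content — the equivalence proved here is about the return value.


-- ===== PORT A =====
-- 'for i in range(n-1)' as the obvious recursion on i; all list indices are in range when
-- accessed (List.set preserves length), so getD is exact for Python's arr[i].
def pvMergeLoopA (a : List Int) (i : Nat) : List Int :=
  if i + 1 < a.length then
    let a' := if a.getD i 0 ≠ 0 ∧ a.getD i 0 = a.getD (i + 1) 0
              then (a.set i (2 * a.getD i 0)).set (i + 1) 0 else a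
    pvMergeLoopA a' (i + 1)
  else a
termination_by a.length - i
decreasing_by
  split
  · simp only [List.length_set]; omega
  · omega

-- 'for i in range(n)' with the nonZeroIndex two-pointer compaction
def pvCompactLoopA (a : List Int) (nz i : Nat) : List Int × Nat :=
  if i < a.length then
    if a.getD i 0 ≠ 0 then pvCompactLoopA (a.set nz (a.getD i 0)) (nz + 1) (i + 1)
    else pvCompactLoopA a nz (i + 1)
  else (a, nz)
termination_by a.length - i
decreasing_by
  · simp only [List.length_set]; omega
  · omega

-- 'while nonZeroIndex < n: arr[nonZeroIndex] = 0'
def pvFillLoopA (a : List Int) (nz : Nat) : List Int :=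
  if nz < a.length then pvFillLoopA (a.set nz 0) (nz + 1) else a
termination_by a.length - nz
decreasing_by simp only [List.length_set]; omega

def modifyAndRearrangeArr (arr : List Int) : List Int :=
  let a1 := pvMergeLoopA arr 0
  let p := pvCompactLoopA a1 0 0
  pvFillLoopA p.1 p.2

-- ===== PORT B =====
-- Source B's single 'while i < n' pass building res; indices are guarded in range, so getD is exact.
def pvWalkLoopB (arr : List Int) (i : Nat) (res : List Int) : List Int :=
  if i < arr.length then
    let a := arr.getD i 0
    if a ≠ 0 ∧ i + 1 < arr.length ∧ arr.getD (i + 1) 0 = a then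
      pvWalkLoopB arr (i + 2) (res ++ [2 * a])
    else
      pvWalkLoopB arr (i + 1) (res ++ (if a ≠ 0 then [a] else []))
  else res
termination_by arr.length - i
decreasing_by all_goals omega

def modifyAndRearrangeArr_alt (arr : List Int) : List Int :=
  let res := pvWalkLoopB arr 0 []
  res ++ List.replicate (arr.length - res.length) 0

-- ===== PRECONDITION & SPEC =====
def Spec_modifyAndRearrangeArr (arr : List Int) (out : List Int) : Prop := out = modifyAndRearrangeArr_alt arr
instance (arr : List Int) (out : List Int) : Decidable (Spec_modifyAndRearrangeArr arr out) := by unfold Spec_modifyAndRearrangeArr; infer_instance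

-- ===== CLAIM (what is proved, stated in full; the proofs are below) =====
def Claim_equal_modifyAndRearrangeArr : Prop := ∀ (arr : List Int), Dom_modifyAndRearrangeArr arr → Spec_modifyAndRearrangeArr arr (modifyAndRearrangeArr arr)

-- ===== LEMMAS AND PROOFS =====

-- the nonzero test, kept as a named predicate so simp does not renormalise it
def pvNz (x : Int) : Bool := x != 0

theorem pvNz_true {x : Int} (h : x ≠ 0) : pvNz x = true := by simp [pvNz, h]

theorem pvNz_false {x : Int} (h : ¬ x ≠ 0) : pvNz x = false := by simp [pvNz]; omega

-- Functional characterisation of A's first pass (left-to-right pairwise merge)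
def pvMg : List Int → List Int
  | a :: b :: r => if a ≠ 0 ∧ a = b then 2 * a :: pvMg (0 :: r) else a :: pvMg (b :: r)
  | l => l
termination_by l => l.length

-- Functional characterisation of B's walk
def pvWb : List Int → List Int
  | a :: b :: r =>
      if a ≠ 0 ∧ b = a then 2 * a :: pvWb r
      else (if a ≠ 0 then [a] else []) ++ pvWb (b :: r)
  | [a] => if a ≠ 0 then [a] else []
  | [] => []
termination_by l => l.length

theorem pvMg_length : ∀ l : List Int, (pvMg l).length = l.length := by
  intro l
  induction l using pvMg.induct <;> simp_all [pvMg] <;> split <;> simp_all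

theorem pvMg_zero_cons (r : List Int) : pvMg (0 :: r) = 0 :: pvMg r := by
  cases r with
  | nil => simp [pvMg]
  | cons c r' => simp [pvMg]

theorem pvFilter_pvMg : ∀ l : List Int, (pvMg l).filter pvNz = pvWb l := by
  intro l
  induction l using pvWb.induct with
  | case1 a b r hcond ih =>
      obtain ⟨ha, hba⟩ := hcond
      simp only [pvMg, pvWb, if_pos (And.intro ha hba.symm), if_pos (And.intro ha hba)]
      rw [pvMg_zero_cons, List.filter_cons, List.filter_cons]
      have h2a : (2 : Int) * a ≠ 0 := by intro h; apply ha; omega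
      rw [pvNz_true h2a, pvNz_false (by omega)]
      simp [ih]
  | case2 a b r hcond ih =>
      have hcond' : ¬(a ≠ 0 ∧ a = b) := by
        intro hx; exact hcond ⟨hx.1, hx.2.symm⟩
      simp only [pvMg, pvWb, if_neg hcond, if_neg hcond']
      rw [List.filter_cons]
      by_cases ha : a = 0
      · rw [pvNz_false (by omega)]; simp [ha, ih]
      · rw [pvNz_true ha]; simp [ha, ih]
  | case3 a ha => simp [pvMg, pvWb, pvNz_true ha, ha]
  | case4 a ha => simp [pvMg, pvWb, pvNz_false ha]; omega
  | case5 => simp [pvMg, pvWb]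

-- A's merge loop computes pvMg on the suffix
theorem pvMergeLoopA_spec : ∀ (a : List Int) (i : Nat), pvMergeLoopA a i = a.take i ++ pvMg (a.drop i) := by
  intro a i
  induction a, i using pvMergeLoopA.induct with
  | case1 a i h a' ih =>
      have hi : i < a.length := by omega
      have hi1 : i + 1 < a.length := h
      have hgi : a.getD i 0 = a[i] := List.getD_eq_getElem a 0 hi
      have hgi1 : a.getD (i+1) 0 = a[i+1] := List.getD_eq_getElem a 0 hi1
      rw [pvMergeLoopA, if_pos h]
      have hdrop : a.drop i = a[i] :: a[i+1] :: a.drop (i+2) := by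
        rw [List.drop_eq_getElem_cons hi, List.drop_eq_getElem_cons hi1]
      by_cases hc : a.getD i 0 ≠ 0 ∧ a.getD i 0 = a.getD (i + 1) 0
      · have ha' : a' = (a.set i (2 * a.getD i 0)).set (i + 1) 0 := by
          simp only [a']; rw [dif_pos hc]
        rw [ha'] at ih
        simp only [if_pos hc]
        rw [ih]
        set b := (a.set i (2 * a.getD i 0)).set (i + 1) 0 with hb
        have htake : b.take (i + 1) = a.take i ++ [2 * a[i]] := by
          rw [hb, hgi, List.take_set_of_le (by omega),
              List.set_eq_take_append_cons_drop, if_pos (by simpa using hi),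
              List.take_append]
          simp [List.length_take, Nat.min_eq_left (Nat.le_of_lt hi), List.take_succ_cons]
        have hdrop' : b.drop (i + 1) = 0 :: a.drop (i + 2) := by
          rw [hb, List.set_eq_take_append_cons_drop (l := a.set i (2 * a.getD i 0)),
              if_pos (by simp [List.length_set]; omega),
              List.drop_append]
          simp only [List.length_take, List.length_set,
            Nat.min_eq_left (by omega : i + 1 ≤ a.length)]
          rw [List.drop_set_of_lt (by omega : i < i + 2)]
          simp
        rw [htake, hdrop', hdrop, pvMg,
            if_pos (by rw [hgi, hgi1] at hc; exact ⟨hc.1, hc.2⟩)]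
        simp
      · have ha' : a' = a := by simp only [a']; rw [dif_neg hc]
        rw [ha'] at ih
        simp only [if_neg hc]
        rw [ih, hdrop, pvMg, if_neg (by rw [hgi, hgi1] at hc; exact hc)]
        have htake : a.take (i + 1) = a.take i ++ [a[i]] := by
          rw [List.take_add_one, List.getElem?_eq_getElem hi]; simp
        rw [htake, List.append_assoc, List.singleton_append,
            List.drop_eq_getElem_cons hi1]
  | case2 a i h =>
      rw [pvMergeLoopA, if_neg h]
      have hmg : pvMg (a.drop i) = a.drop i := by
        have hlen : (a.drop i).length ≤ 1 := by simp [List.length_drop]; omega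
        match hd : a.drop i with
        | [] => simp [pvMg]
        | [x] => simp [pvMg]
        | x :: y :: r => rw [hd] at hlen; simp at hlen
      rw [hmg, List.take_append_drop]

-- A's compaction loop: final count, length preservation, and compacted prefix
theorem pvCompactLoopA_spec : ∀ (a : List Int) (nz i : Nat), nz ≤ i →
    (pvCompactLoopA a nz i).2 = nz + ((a.drop i).filter pvNz).length ∧
    (pvCompactLoopA a nz i).1.length = a.length ∧
    (pvCompactLoopA a nz i).1.take (pvCompactLoopA a nz i).2
      = a.take nz ++ (a.drop i).filter pvNz := by
  intro a nz i
  induction a, nz, i using pvCompactLoopA.induct with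
  | case1 a nz i h hne ih =>
      intro hle
      rw [pvCompactLoopA, if_pos h, if_pos hne]
      have hg : a.getD i 0 = a[i] := List.getD_eq_getElem a 0 h
      have hnz : nz < a.length := by omega
      obtain ⟨h1, h2, h3⟩ := ih (by omega)
      have hdrop : a.drop i = a[i] :: a.drop (i + 1) := List.drop_eq_getElem_cons h
      have hfd : (a.drop i).filter pvNz = a[i] :: (a.drop (i+1)).filter pvNz := by
        rw [hdrop, List.filter_cons, pvNz_true (by rwa [hg] at hne)]
        simp
      have hsetdrop : (a.set nz (a.getD i 0)).drop (i + 1) = a.drop (i + 1) :=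
        List.drop_set_of_lt (by omega)
      have hsettake : (a.set nz (a.getD i 0)).take (nz + 1) = a.take nz ++ [a[i]] := by
        rw [hg, List.set_eq_take_append_cons_drop, if_pos hnz, List.take_append]
        simp [List.length_take, Nat.min_eq_left (Nat.le_of_lt hnz), List.take_succ_cons]
      refine ⟨?_, ?_, ?_⟩
      · rw [h1, hsetdrop, hfd]; simp; omega
      · rw [h2]; simp [List.length_set]
      · rw [h3, hsetdrop, hsettake, hfd]; simp
  | case2 a nz i h hne ih =>
      intro hle
      rw [pvCompactLoopA, if_pos h, if_neg hne]
      obtain ⟨h1, h2, h3⟩ := ih (by omega)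
      have hg : a.getD i 0 = a[i] := List.getD_eq_getElem a 0 h
      have hdrop : a.drop i = a[i] :: a.drop (i + 1) := List.drop_eq_getElem_cons h
      have hfd : (a.drop i).filter pvNz = (a.drop (i+1)).filter pvNz := by
        rw [hdrop, List.filter_cons, pvNz_false (by rwa [hg] at hne)]
        simp
      exact ⟨by rw [h1, hfd], h2, by rw [h3, hfd]⟩
  | case3 a nz i h =>
      intro hle
      rw [pvCompactLoopA, if_neg h]
      simp [List.drop_eq_nil_of_le (by omega : a.length ≤ i)]

-- the zero-fill loop pads with zeros up to the length
theorem pvFillLoopA_spec : ∀ (a : List Int) (nz : Nat),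
    pvFillLoopA a nz = a.take nz ++ List.replicate (a.length - nz) 0 := by
  intro a nz
  induction a, nz using pvFillLoopA.induct with
  | case1 a nz h ih =>
      rw [pvFillLoopA, if_pos h, ih]
      have htake : (a.set nz 0).take (nz + 1) = a.take nz ++ [0] := by
        rw [List.set_eq_take_append_cons_drop, if_pos h, List.take_append]
        simp [List.length_take, Nat.min_eq_left (Nat.le_of_lt h), List.take_succ_cons]
      rw [htake, List.length_set]
      have hrep : a.length - nz = (a.length - (nz + 1)) + 1 := by omega
      rw [hrep, List.replicate_succ]
      simp
  | case2 a nz h =>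
      rw [pvFillLoopA, if_neg h]
      have h0 : a.length - nz = 0 := by omega
      simp [h0, List.take_of_length_le (by omega : a.length ≤ nz)]

-- B's walk loop computes pvWb on the suffix
theorem pvWalkLoopB_spec (arr : List Int) : ∀ (i : Nat) (res : List Int),
    pvWalkLoopB arr i res = res ++ pvWb (arr.drop i) := by
  intro i res
  induction i, res using pvWalkLoopB.induct arr with
  | case1 i res h av hc ih =>
      simp only [av] at hc ih
      rw [pvWalkLoopB, if_pos h]
      simp only [if_pos hc]
      rw [ih]
      obtain ⟨ha, hi1, heq⟩ := hc
      have hgi : arr.getD i 0 = arr[i] := List.getD_eq_getElem arr 0 h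
      have hgi1 : arr.getD (i+1) 0 = arr[i+1] := List.getD_eq_getElem arr 0 hi1
      have hdrop : arr.drop i = arr[i] :: arr[i+1] :: arr.drop (i+2) := by
        rw [List.drop_eq_getElem_cons h, List.drop_eq_getElem_cons hi1]
      rw [hdrop, pvWb,
          if_pos ⟨by rwa [hgi] at ha, by rw [← hgi, ← hgi1]; exact heq⟩]
      rw [hgi]
      simp only [List.append_assoc, List.singleton_append]
  | case2 i res h av hc ih =>
      simp only [av] at hc ih
      rw [dite_eq_ite] at ih
      rw [pvWalkLoopB, if_pos h]
      simp only [if_neg hc]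
      rw [ih]
      have hgi : arr.getD i 0 = arr[i] := List.getD_eq_getElem arr 0 h
      by_cases hi1 : i + 1 < arr.length
      · have hgi1 : arr.getD (i+1) 0 = arr[i+1] := List.getD_eq_getElem arr 0 hi1
        have hdrop : arr.drop i = arr[i] :: arr[i+1] :: arr.drop (i+2) := by
          rw [List.drop_eq_getElem_cons h, List.drop_eq_getElem_cons hi1]
        have hdrop1 : arr.drop (i+1) = arr[i+1] :: arr.drop (i+2) := List.drop_eq_getElem_cons hi1
        have hcond : ¬(arr[i] ≠ 0 ∧ arr[i+1] = arr[i]) := by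
          intro hx
          exact hc ⟨by rw [hgi]; exact hx.1, hi1, by rw [hgi, hgi1]; exact hx.2⟩
        rw [hdrop, pvWb, if_neg hcond, hdrop1, hgi, List.append_assoc]
      · have hdrop1 : arr.drop (i + 1) = [] := List.drop_eq_nil_of_le (by omega)
        have hdrop : arr.drop i = [arr[i]] := by
          rw [List.drop_eq_getElem_cons h, hdrop1]
        rw [hdrop, hdrop1, pvWb, hgi]
        simp only [List.append_nil, pvWb]
  | case3 i res h =>
      rw [pvWalkLoopB, if_neg h]
      have hd : arr.drop i = [] := List.drop_eq_nil_of_le (by omega)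
      simp [hd, pvWb]

-- ===== VERDICT (by name: the statement is the Claim_ definition above) =====
theorem modifyAndRearrangeArr_spec : Claim_equal_modifyAndRearrangeArr := by
  intro arr _
  unfold Spec_modifyAndRearrangeArr modifyAndRearrangeArr modifyAndRearrangeArr_alt
  have hm : pvMergeLoopA arr 0 = pvMg arr := by simpa using pvMergeLoopA_spec arr 0
  have hw : pvWalkLoopB arr 0 [] = pvWb arr := by simpa using pvWalkLoopB_spec arr 0 []
  obtain ⟨h1, h2, h3⟩ := pvCompactLoopA_spec (pvMg arr) 0 0 (le_refl 0)
  simp only [List.drop_zero, List.take_zero, List.nil_append, Nat.zero_add] at h1 h3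
  simp only [hm, hw]
  rw [pvFillLoopA_spec, h3, h2, h1, pvMg_length, pvFilter_pvMg]
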